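-- pv_equiv track=rewrite | github.com/Yusup-Badurgov/trading_just_channel | main.py | find_longest_repeating_combination_from_end
-- ===== SOURCE A (Python) =====
-- def find_longest_repeating_combination_from_end(color_sequence):
--     max_length = len(color_sequence)
--     end_combo = color_sequence[-max_length:]
--     # Поиск последнего вхождения комбинации в строку до конца
--     last_occurrence = -1
--     for length in range(len(end_combo), 0, -1):
--         sub_combo = end_combo[-length:]
--         occurrence = color_sequence.rfind(sub_combo, 0, max_length - length)
--         if occurrence != -1:
--             last_occurrence = occurrence
--             end_combo = sub_combo
--             break
--     return end_combo, last_occurrence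
-- ===== SOURCE B (Python) =====
-- def find_longest_repeating_combination_from_end(color_sequence):
--     # Binary search on the suffix length: "suffix of length L reoccurs earlier
--     # (non-overlapping)" is monotone downward, so the largest such L can be
--     # found with O(log n) rfind scans instead of A's O(n) descending scan.
--     s = color_sequence
--     n = len(s)
--
--     def ok(L):
--         return s.rfind(s[n - L:], 0, n - L) != -1
--
--     best = 0
--     lo, hi = 1, n // 2
--     while lo <= hi:
--         mid = (lo + hi) // 2
--         if ok(mid):
--             best = mid
--             lo = mid + 1
--         else:
--             hi = mid - 1
--     if best == 0:
--         return s, -1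
--     return s[n - best:], s.rfind(s[n - best:], 0, n - best)
-- ===== Notes on version B (the rewrite author's own statement) =====
-- stated objective: faster
-- what changed: Replaces A's descending linear scan over all candidate suffix lengths (one rfind scan per length) by a binary search on the suffix length, exploiting that having a non-overlapping earlier occurrence is downward monotone in the suffix length; only O(log n) rfind scans are needed.
import Mathlib
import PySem

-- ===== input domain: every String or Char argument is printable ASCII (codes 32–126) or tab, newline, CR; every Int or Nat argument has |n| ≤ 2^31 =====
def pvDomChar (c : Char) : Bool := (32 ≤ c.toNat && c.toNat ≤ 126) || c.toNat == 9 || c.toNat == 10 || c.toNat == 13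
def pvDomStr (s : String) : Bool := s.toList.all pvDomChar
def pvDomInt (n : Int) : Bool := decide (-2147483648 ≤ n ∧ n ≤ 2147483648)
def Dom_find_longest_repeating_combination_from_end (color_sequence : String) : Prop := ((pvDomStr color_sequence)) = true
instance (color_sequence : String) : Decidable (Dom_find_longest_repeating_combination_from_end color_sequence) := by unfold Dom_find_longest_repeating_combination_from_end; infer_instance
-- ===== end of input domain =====

-- B replaces A's descending linear scan over suffix lengths by a binary search on the
-- (monotone) suffix length; objective: faster (O(log n) rfind scans instead of O(n)).

-- shared helper: Python's str.rfind(sub, 0, end) for 0 ≤ end ≤ len(s):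
-- the largest p with p + len(sub) ≤ end and s[p:p+len(sub)] == sub, else -1.
-- (exact on this restricted form, which is the only one either Python uses)
def pvRFind (s sub : List Char) (endN : Nat) : Int :=
  match (List.range (endN + 1 - sub.length)).reverse.find?
      (fun p => (s.drop p).take sub.length == sub) with
  | some p => (p : Int)
  | none => -1

-- ===== PORT A =====
-- the for-loop of A (length from L down to 1, break on the first hit);
-- end_combo is only reassigned at the break, so sub_combo = s[-length:] = drop (n-length) s
def pvALoop (s : List Char) (n : Nat) : Nat → (List Char × Int)
  | 0 => (s, -1)
  | l + 1 =>
    let sub := s.drop (n - (l + 1))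
    let occ := pvRFind s sub (n - (l + 1))
    if occ ≠ -1 then (sub, occ) else pvALoop s n l

def find_longest_repeating_combination_from_end (color_sequence : String) : String × Int :=
  let s := color_sequence.toList
  let n := s.length
  -- end_combo = color_sequence[-n:] = the whole string
  let r := pvALoop s n n
  (String.ofList r.1, r.2)

-- ===== PORT B =====
-- the while-loop of B: binary search for the largest L in [lo, hi] with ok(L);
-- the extra fuel argument only guards totality (it never runs out for the actual call)
def pvBSearch (s : List Char) (n : Nat) : Nat → Nat → Nat → Nat → Nat
  | 0, _lo, _hi, best => best
  | fuel + 1, lo, hi, best =>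
    if lo ≤ hi then
      let mid := (lo + hi) / 2
      if pvRFind s (s.drop (n - mid)) (n - mid) ≠ -1 then
        pvBSearch s n fuel (mid + 1) hi mid
      else
        pvBSearch s n fuel lo (mid - 1) best
    else best

def find_longest_repeating_combination_from_end_alt (color_sequence : String) : String × Int :=
  let s := color_sequence.toList
  let n := s.length
  let best := pvBSearch s n (n / 2) 1 (n / 2) 0
  if best = 0 then (String.ofList s, -1)
  else (String.ofList (s.drop (n - best)), pvRFind s (s.drop (n - best)) (n - best))

-- ===== PRECONDITION & SPEC =====
def Spec_find_longest_repeating_combination_from_end (color_sequence : String) (out : String × Int) : Prop := out = find_longest_repeating_combination_from_end_alt color_sequence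
instance (color_sequence : String) (out : String × Int) : Decidable (Spec_find_longest_repeating_combination_from_end color_sequence out) := by unfold Spec_find_longest_repeating_combination_from_end; infer_instance

-- ===== CLAIM (what is proved, stated in full; the proofs are below) =====
def Claim_equal_find_longest_repeating_combination_from_end : Prop := ∀ (color_sequence : String), Dom_find_longest_repeating_combination_from_end color_sequence → Spec_find_longest_repeating_combination_from_end color_sequence (find_longest_repeating_combination_from_end color_sequence)

-- ===== LEMMAS AND PROOFS =====

-- the predicate both loops test: suffix of length L reoccurs (non-overlapping)
def pvOk (s : List Char) (n L : Nat) : Bool := pvRFind s (s.drop (n - L)) (n - L) != -1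

-- largest L in [1, K] with pvOk, else 0 (proof-only reference implementation)
def pvLinMax (s : List Char) (n : Nat) : Nat → Nat
  | 0 => 0
  | l + 1 => if pvOk s n (l + 1) then l + 1 else pvLinMax s n l

theorem pvRFind_ne_iff (s sub : List Char) (endN : Nat) :
    pvRFind s sub endN ≠ -1 ↔
      ∃ p, p + sub.length ≤ endN ∧ (s.drop p).take sub.length = sub := by
  unfold pvRFind
  rcases hf : (List.range (endN + 1 - sub.length)).reverse.find?
      (fun p => (s.drop p).take sub.length == sub) with _ | p
  · simp only
    constructor
    · intro h; exact absurd rfl h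
    · rintro ⟨p, hp, hm⟩
      have := List.find?_eq_none.mp hf p
        (by simp [List.mem_reverse, List.mem_range]; omega)
      simp [hm] at this
  · simp only
    constructor
    · intro _
      have hmem := List.mem_of_find?_eq_some hf
      have hpred := List.find?_some hf
      simp [List.mem_reverse, List.mem_range] at hmem
      simp at hpred
      exact ⟨p, by omega, hpred⟩
    · intro _; simp

theorem pvOk_iff (s : List Char) (n L : Nat) (hn : n = s.length) (hL : L ≤ n) :
    pvOk s n L = true ↔
      ∃ p, p + L ≤ n - L ∧ (s.drop p).take L = s.drop (n - L) := by
  have hlen : (s.drop (n - L)).length = L := by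
    simp [List.length_drop, ← hn]; omega
  unfold pvOk
  rw [bne_iff_ne, pvRFind_ne_iff, hlen]

theorem pvOk_down (s : List Char) (n L : Nat) (hn : n = s.length) (_hL : 1 ≤ L)
    (hLn : L + 1 ≤ n) (h : pvOk s n (L + 1) = true) : pvOk s n L = true := by
  rw [pvOk_iff s n (L + 1) hn (by omega)] at h
  rw [pvOk_iff s n L hn (by omega)]
  obtain ⟨p, hp, hm⟩ := h
  refine ⟨p + 1, by omega, ?_⟩
  have h1 : ((s.drop p).take (L + 1)).drop 1 = (s.drop (n - (L + 1))).drop 1 := by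
    rw [hm]
  rw [List.drop_take, List.drop_drop, List.drop_drop] at h1
  have e3 : n - (L + 1) + 1 = n - L := by omega
  rw [e3] at h1
  simpa using h1

theorem pvOk_le (s : List Char) (n L k : Nat) (hn : n = s.length) (hk : 1 ≤ k)
    (hkL : k ≤ L) (hL : L ≤ n) (h : pvOk s n L = true) : pvOk s n k = true := by
  induction L with
  | zero => omega
  | succ l ih =>
    rcases Nat.lt_or_ge k (l + 1) with hlt | hge
    · exact ih (by omega) (by omega) (pvOk_down s n l hn (by omega) (by omega) h)
    · have : k = l + 1 := by omega
      rw [this]; exact h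

theorem pvOk_bound (s : List Char) (n L : Nat) (hn : n = s.length) (_hL : 1 ≤ L)
    (hLn : L ≤ n) (h : pvOk s n L = true) : 2 * L ≤ n := by
  rw [pvOk_iff s n L hn hLn] at h
  obtain ⟨p, hp, _⟩ := h
  omega

theorem pvLinMax_le (s : List Char) (n K : Nat) : pvLinMax s n K ≤ K := by
  induction K with
  | zero => simp [pvLinMax]
  | succ l ih =>
    unfold pvLinMax
    split
    · omega
    · omega

theorem pvLinMax_ok (s : List Char) (n K : Nat) :
    pvLinMax s n K = 0 ∨ pvOk s n (pvLinMax s n K) = true := by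
  induction K with
  | zero => left; simp [pvLinMax]
  | succ l ih =>
    unfold pvLinMax
    split
    · right; assumption
    · exact ih

theorem pvLinMax_ge (s : List Char) (n L K : Nat) (hL : 1 ≤ L) (hLK : L ≤ K)
    (h : pvOk s n L = true) : L ≤ pvLinMax s n K := by
  induction K with
  | zero => omega
  | succ l ih =>
    unfold pvLinMax
    split
    · omega
    · rename_i hne
      rcases Nat.lt_or_ge L (l + 1) with hlt | hge
      · exact ih (by omega)
      · have : L = l + 1 := by omega
        rw [this] at h; simp [h] at hne

-- pvOk holds exactly on [1, M] where M = pvLinMax s n n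
theorem pvOk_iff_le_M (s : List Char) (n L : Nat) (hn : n = s.length)
    (hL : 1 ≤ L) (hLn : L ≤ n) :
    pvOk s n L = true ↔ L ≤ pvLinMax s n n := by
  constructor
  · intro h; exact pvLinMax_ge s n L n hL hLn h
  · intro h
    rcases pvLinMax_ok s n n with h0 | hok
    · omega
    · exact pvOk_le s n (pvLinMax s n n) L hn hL h (pvLinMax_le s n n) hok

theorem pvM_le_half (s : List Char) (n : Nat) (hn : n = s.length) :
    pvLinMax s n n ≤ n / 2 := by
  rcases Nat.eq_zero_or_pos (pvLinMax s n n) with h0 | hpos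
  · omega
  · rcases pvLinMax_ok s n n with h0 | hok
    · omega
    · have := pvOk_bound s n (pvLinMax s n n) hn hpos (pvLinMax_le s n n) hok
      omega

-- A's loop computes the result determined by M = pvLinMax s n n
theorem pvALoop_eq (s : List Char) (n L : Nat) :
    pvALoop s n L =
      if pvLinMax s n L = 0 then (s, -1)
      else (s.drop (n - pvLinMax s n L),
            pvRFind s (s.drop (n - pvLinMax s n L)) (n - pvLinMax s n L)) := by
  induction L with
  | zero => simp [pvALoop, pvLinMax]
  | succ l ih =>
    by_cases h : pvRFind s (s.drop (n - (l + 1))) (n - (l + 1)) = -1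
    · simp [pvALoop, pvLinMax, pvOk, h, ih]
    · simp [pvALoop, pvLinMax, pvOk, h, bne_iff_ne]

-- B's binary search computes M, given the loop invariant
theorem pvBSearch_eq (s : List Char) (n : Nat) (hn : n = s.length) :
    ∀ fuel lo hi best, hi + 1 - lo ≤ fuel →
      lo = best + 1 → best ≤ pvLinMax s n n → pvLinMax s n n ≤ hi → hi ≤ n →
      pvBSearch s n fuel lo hi best = pvLinMax s n n := by
  intro fuel
  induction fuel with
  | zero =>
    intro lo hi best hf hlo hb hM hh
    unfold pvBSearch
    omega
  | succ f ih =>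
    intro lo hi best hf hlo hb hM hh
    unfold pvBSearch
    by_cases hle : lo ≤ hi
    · simp only [hle, if_true]
      have hmid1 : lo ≤ (lo + hi) / 2 := by omega
      have hmid2 : (lo + hi) / 2 ≤ hi := by omega
      have hok : pvRFind s (s.drop (n - (lo + hi) / 2)) (n - (lo + hi) / 2) ≠ -1 ↔
          pvOk s n ((lo + hi) / 2) = true := by
        unfold pvOk; rw [bne_iff_ne]
      have hMn : pvLinMax s n n ≤ n := pvLinMax_le s n n
      by_cases hc : pvRFind s (s.drop (n - (lo + hi) / 2)) (n - (lo + hi) / 2) = -1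
      · simp only [ne_eq, hc, not_true_eq_false, if_false]
        have hnotle : ¬ ((lo + hi) / 2 ≤ pvLinMax s n n) := by
          intro hcontra
          exact (hok.mpr ((pvOk_iff_le_M s n ((lo + hi) / 2) hn (by omega)
            (by omega)).mpr hcontra)) hc
        exact ih lo ((lo + hi) / 2 - 1) best (by omega) hlo hb (by omega) (by omega)
      · simp only [ne_eq, hc, not_false_eq_true, if_true]
        have hle' : (lo + hi) / 2 ≤ pvLinMax s n n :=
          (pvOk_iff_le_M s n ((lo + hi) / 2) hn (by omega) (by omega)).mp (hok.mp hc)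
        exact ih ((lo + hi) / 2 + 1) hi ((lo + hi) / 2) (by omega) rfl hle' hM hh
    · simp only [hle, if_false]
      omega

-- ===== VERDICT (by name: the statement is the Claim_ definition above) =====
theorem find_longest_repeating_combination_from_end_spec : Claim_equal_find_longest_repeating_combination_from_end := by
  intro cs _
  unfold Spec_find_longest_repeating_combination_from_end
  simp only [find_longest_repeating_combination_from_end,
    find_longest_repeating_combination_from_end_alt]
  rw [pvALoop_eq,
    pvBSearch_eq cs.toList cs.toList.length rfl (cs.toList.length / 2) 1
      (cs.toList.length / 2) 0 (by omega) rfl (by omega)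
      (pvM_le_half cs.toList cs.toList.length rfl) (by omega)]
  split <;> rfl
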